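-- pv_equiv track=rewrite | github.com/uday1874533/CODECHEF | HCAGMAM1.py | calculate_salary
-- ===== SOURCE A (Python) =====
-- def calculate_salary(t, test_cases):
--     results = []
--     for i in range(t):
--         X, Y = test_cases[i][:2]
--         binary_string = test_cases[i][2]
--
--         total_working_days = binary_string.count('1')
--         total_salary = total_working_days * X
--
--         longest_streak = 0
--         current_streak = 0
--
--         for char in binary_string:
--             if char == '1':
--                 current_streak += 1
--                 longest_streak = max(longest_streak, current_streak)
--             else:
--                 current_streak = 0
--
--         bonus = longest_streak * Y
--
--         final_salary = total_salary + bonus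
--         results.append(final_salary)
--
--     return results
-- ===== SOURCE B (Python) =====
-- def _case_salary(tc):
--     X, Y, s = tc
--     runs = [len(run) for run in ''.join(c if c == '1' else ' ' for c in s).split()]
--     return sum(runs) * X + max(runs, default=0) * Y
--
--
-- def calculate_salary(t, test_cases):
--     return [_case_salary(tc) for tc in test_cases[:max(t, 0)]]
-- ===== Notes on version B (the rewrite author's own statement) =====
-- stated objective: simpler
-- what changed: The manual indexed loop with a running current/longest-streak accumulator is replaced by a slice-and-map over the test cases that blanks non-working days, tokenizes the string into runs of '1' with str.split(), and aggregates them with sum and max(..., default=0).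
import Mathlib
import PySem

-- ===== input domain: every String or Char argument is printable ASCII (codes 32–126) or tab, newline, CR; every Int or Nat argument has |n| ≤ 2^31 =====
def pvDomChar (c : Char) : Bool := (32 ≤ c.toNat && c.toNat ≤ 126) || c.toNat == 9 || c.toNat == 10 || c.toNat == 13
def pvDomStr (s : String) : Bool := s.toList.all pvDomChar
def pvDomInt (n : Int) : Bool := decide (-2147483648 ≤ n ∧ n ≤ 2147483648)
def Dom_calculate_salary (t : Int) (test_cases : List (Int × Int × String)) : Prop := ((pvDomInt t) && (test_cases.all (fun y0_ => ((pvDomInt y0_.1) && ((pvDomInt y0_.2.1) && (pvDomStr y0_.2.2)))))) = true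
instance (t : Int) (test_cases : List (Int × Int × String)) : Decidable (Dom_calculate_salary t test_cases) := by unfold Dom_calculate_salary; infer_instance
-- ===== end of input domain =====

-- B replaces A's running current/longest-streak accumulator loop by blank-then-split tokenization
-- of the runs of '1' aggregated with sum and max; objective: simpler.

-- ===== PORT A =====
-- A-side helper: the body of A's loop over test-case indices, verbatim
def pvCaseA (tc : Int × Int × String) : Int :=
  let X := tc.1
  let Y := tc.2.1
  let binary_string := tc.2.2
  let total_working_days : Int := (PySem.Str.count binary_string "1" : Int)
  let total_salary := total_working_days * X
  -- for char in binary_string: running (longest_streak, current_streak) state, start (0, 0)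
  let st := binary_string.toList.foldl
    (fun (st : Int × Int) char =>
      if char = '1' then (max st.1 (st.2 + 1), st.2 + 1) else (st.1, 0)) (0, 0)
  let bonus := st.1 * Y
  total_salary + bonus

def calculate_salary (t : Int) (test_cases : List (Int × Int × String)) : List Int :=
  (PySem.List.pyRange 0 t).foldl
    (fun results i => results ++ [pvCaseA (PySem.List.pyGetD test_cases i (0, 0, ""))]) []

-- ===== PORT B =====
-- B-side helper: _case_salary from Source B
def pvCaseB (tc : Int × Int × String) : Int :=
  let X := tc.1
  let Y := tc.2.1
  let s := tc.2.2
  -- ''.join(c if c == '1' else ' ' for c in s)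
  let blanked := String.ofList (s.toList.map (fun c => if c = '1' then c else ' '))
  -- [len(run) for run in blanked.split()]
  let runs : List Int := (PySem.Str.split₀ blanked).map (fun run => PySem.Str.len run)
  runs.sum * X + ((PySem.List.max? runs (fun x => x)).getD 0) * Y

def calculate_salary_alt (t : Int) (test_cases : List (Int × Int × String)) : List Int :=
  (PySem.List.slice test_cases none (some (max t 0))).map pvCaseB

-- ===== PRECONDITION & SPEC =====
-- A indexes test_cases[i] for i in range(t): it raises IndexError iff t > len(test_cases).
def Pre_calculate_salary (t : Int) (test_cases : List (Int × Int × String)) : Prop :=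
  t ≤ (test_cases.length : Int)
instance (t : Int) (test_cases : List (Int × Int × String)) : Decidable (Pre_calculate_salary t test_cases) := by unfold Pre_calculate_salary; infer_instance

def pvWitness_calculate_salary : Int × (List (Int × Int × String)) := (1, [(2, 3, "1011")])

def Spec_calculate_salary (t : Int) (test_cases : List (Int × Int × String)) (out : List Int) : Prop := out = calculate_salary_alt t test_cases
instance (t : Int) (test_cases : List (Int × Int × String)) (out : List Int) : Decidable (Spec_calculate_salary t test_cases out) := by unfold Spec_calculate_salary; infer_instance

-- ===== CLAIM (what is proved, stated in full; the proofs are below) =====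
def Claim_equal_calculate_salary : Prop := ∀ (t : Int) (test_cases : List (Int × Int × String)), Dom_calculate_salary t test_cases → Pre_calculate_salary t test_cases → Spec_calculate_salary t test_cases (calculate_salary t test_cases)

-- ===== LEMMAS AND PROOFS =====

-- lengths of the maximal runs of '1' in a char list, given a current open run of length n
def pvRuns : List Char → Nat → List Nat
  | [], n => if n = 0 then [] else [n]
  | c :: l, n => if c = '1' then pvRuns l (n + 1) else (if n = 0 then [] else [n]) ++ pvRuns l 0

def pvMaxN : List Nat → Nat
  | [] => 0
  | x :: l => max x (pvMaxN l)

-- Nat version of A's streak fold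
def pvFoldN : List Char → Nat → Nat → Nat
  | [], L, _ => L
  | c :: l, L, n => if c = '1' then pvFoldN l (max L (n + 1)) (n + 1) else pvFoldN l L 0

def pvBlank (c : Char) : Char := if c = '1' then c else ' '

theorem pv_go_blank_len (cs : List Char) : ∀ (cur : List Char) (acc : List (List Char)),
    (PySem.Chars.split₀.go (cs.map pvBlank) cur acc).map List.length
      = (acc.reverse.map List.length) ++ pvRuns cs cur.length := by
  induction cs with
  | nil =>
      intro cur acc
      simp only [List.map_nil, PySem.Chars.split₀.go, pvRuns]
      by_cases h : cur = []
      · simp [h]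
      · simp [h, List.isEmpty_iff, List.length_eq_zero_iff]
  | cons c l ih =>
      intro cur acc
      by_cases hc : c = '1'
      · have hsp : PySem.Chars.isspace (pvBlank c) = false := by
          simp [pvBlank, hc]; decide
        simp only [List.map_cons, PySem.Chars.split₀.go, hsp, Bool.false_eq_true, if_false]
        rw [ih (pvBlank c :: cur) acc]
        simp [pvRuns, hc]
      · have hsp : PySem.Chars.isspace (pvBlank c) = true := by
          simp [pvBlank, hc]; decide
        simp only [List.map_cons, PySem.Chars.split₀.go, hsp, if_true]
        by_cases h : cur = []
        · simp only [h, List.isEmpty_nil, if_true]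
          rw [ih [] acc]
          simp [pvRuns, hc]
        · simp only [List.isEmpty_iff, h, if_false]
          rw [ih [] (cur.reverse :: acc)]
          simp [pvRuns, hc, List.length_eq_zero_iff, h]
theorem pv_split_blank (cs : List Char) :
    (PySem.Chars.split₀ (cs.map pvBlank)).map List.length = pvRuns cs 0 := by
  unfold PySem.Chars.split₀
  simpa using pv_go_blank_len cs [] []

theorem pv_runs_sum (cs : List Char) : ∀ n : Nat, (pvRuns cs n).sum = n + cs.count '1' := by
  induction cs with
  | nil => intro n; by_cases h : n = 0 <;> simp [pvRuns, h]
  | cons c l ih =>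
      intro n
      by_cases hc : c = '1'
      · simp [pvRuns, hc, ih, List.count_cons]; omega
      · by_cases h : n = 0 <;> simp [pvRuns, hc, h, ih, List.count_cons] <;> omega

theorem pvMaxN_append (a b : List Nat) : pvMaxN (a ++ b) = max (pvMaxN a) (pvMaxN b) := by
  induction a with
  | nil => simp [pvMaxN]
  | cons x l ih => simp [pvMaxN, ih, Nat.max_assoc]

theorem pv_le_maxN_runs (cs : List Char) : ∀ n : Nat, n ≤ pvMaxN (pvRuns cs n) := by
  induction cs with
  | nil => intro n; by_cases h : n = 0 <;> simp [pvRuns, h, pvMaxN]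
  | cons c l ih =>
      intro n
      by_cases hc : c = '1'
      · simp only [pvRuns, hc, if_true]
        have := ih (n + 1); omega
      · simp only [pvRuns, hc, if_false, pvMaxN_append]
        by_cases h : n = 0 <;> simp [h, pvMaxN] <;> omega

theorem pv_foldN_spec (cs : List Char) : ∀ L n : Nat, n ≤ L →
    pvFoldN cs L n = max L (pvMaxN (pvRuns cs n)) := by
  induction cs with
  | nil => intro L n h; by_cases h0 : n = 0 <;> simp [pvFoldN, pvRuns, h0, pvMaxN] <;> omega
  | cons c l ih =>
      intro L n h
      by_cases hc : c = '1'
      · simp only [pvFoldN, pvRuns, hc, if_true]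
        rw [ih (max L (n + 1)) (n + 1) (le_max_right _ _)]
        have := pv_le_maxN_runs l (n + 1)
        omega
      · simp only [pvFoldN, pvRuns, hc, if_false]
        rw [ih L 0 (Nat.zero_le _), pvMaxN_append]
        by_cases h0 : n = 0 <;> simp [h0, pvMaxN] <;> omega

theorem pv_foldInt_eq (cs : List Char) : ∀ L n : Nat,
    (cs.foldl (fun (st : Int × Int) char =>
        if char = '1' then (max st.1 (st.2 + 1), st.2 + 1) else (st.1, 0))
      ((L : Int), (n : Int))).1 = (pvFoldN cs L n : Int) := by
  induction cs with
  | nil => intro L n; simp [pvFoldN]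
  | cons c l ih =>
      intro L n
      by_cases hc : c = '1'
      · simp only [List.foldl_cons, hc, if_true, pvFoldN]
        have h1 : ((max (L : Int) ((n : Int) + 1)), ((n : Int) + 1))
            = (((max L (n + 1) : Nat) : Int), (((n + 1 : Nat)) : Int)) := by
          push_cast [Nat.cast_max]; simp
        rw [h1, ih]
      · simp only [List.foldl_cons, hc, if_false, pvFoldN]
        have h1 : (((L : Int)), (0 : Int)) = (((L : Nat) : Int), (((0 : Nat)) : Int)) := by simp
        rw [h1, ih]

theorem pv_count_go_one : ∀ (fuel : Nat) (l : List Char) (acc : Nat), l.length ≤ fuel →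
    PySem.Chars.count.go ['1'] fuel l acc = acc + l.count '1' := by
  intro fuel
  induction fuel with
  | zero =>
      intro l acc h
      have : l = [] := by
        cases l with
        | nil => rfl
        | cons a l => simp at h
      subst this; simp [PySem.Chars.count.go]
  | succ f ih =>
      intro l acc h
      cases l with
      | nil => simp [PySem.Chars.count.go]
      | cons a l =>
          by_cases ha : a = '1'
          · have hp : List.isPrefixOf ['1'] (a :: l) = true := by
              simp [List.isPrefixOf, ha]
            simp only [PySem.Chars.count.go, hp, if_true]
            rw [show List.drop (['1'].length) (a :: l) = l by simp]
            rw [ih l (acc + 1) (by simpa using Nat.le_of_succ_le_succ h)]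
            simp [List.count_cons, ha]; omega
          · have hp : List.isPrefixOf ['1'] (a :: l) = false := by
              simp [List.isPrefixOf]; exact fun hh => ha hh.symm
            simp only [PySem.Chars.count.go, hp, Bool.false_eq_true, if_false]
            rw [ih l acc (by simpa using Nat.le_of_succ_le_succ h)]
            simp [List.count_cons, ha]

theorem pv_count_one (cs : List Char) : PySem.Chars.count cs ['1'] = cs.count '1' := by
  unfold PySem.Chars.count
  simp [pv_count_go_one cs.length cs 0 le_rfl]

theorem pv_foldl_max_nat (l : List Nat) : ∀ x : Nat, List.foldl max x l = max x (pvMaxN l) := by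
  induction l with
  | nil => intro x; simp [pvMaxN]
  | cons y l ih =>
      intro x
      simp only [List.foldl_cons, pvMaxN, ih (max x y), Nat.max_assoc]

theorem pv_foldl_max_cast (l : List Nat) : ∀ x : Nat,
    List.foldl max ((x : Nat) : Int) (l.map (fun n : Nat => (n : Int)))
      = ((List.foldl max x l : Nat) : Int) := by
  induction l with
  | nil => intro x; simp
  | cons y l ih =>
      intro x
      simp only [List.map_cons, List.foldl_cons, ← Nat.cast_max, ih (max x y)]

theorem pv_max?_eq (l : List Nat) :
    ((PySem.List.max? (l.map (fun n : Nat => (n : Int))) (fun x => x)).getD 0)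
      = (pvMaxN l : Int) := by
  cases l with
  | nil => simp [PySem.List.max?, pvMaxN]
  | cons x l =>
      rw [List.map_cons, PySem.List.max?_id_cons, Option.getD_some,
        pv_foldl_max_cast, pv_foldl_max_nat]
      simp [pvMaxN]

theorem pv_case_eq (tc : Int × Int × String) : pvCaseA tc = pvCaseB tc := by
  obtain ⟨X, Y, s⟩ := tc
  simp only [pvCaseA, pvCaseB]
  have hblank : (String.ofList (s.toList.map (fun c => if c = '1' then c else ' '))).toList
      = s.toList.map pvBlank := by
    simp [pvBlank]
  have hruns : (PySem.Str.split₀ (String.ofList (s.toList.map (fun c => if c = '1' then c else ' ')))).map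
      (fun run => PySem.Str.len run)
      = (pvRuns s.toList 0).map (fun n : Nat => (n : Int)) := by
    have h1 : (PySem.Str.split₀ (String.ofList (s.toList.map (fun c => if c = '1' then c else ' ')))).map
        (fun run => PySem.Str.len run)
        = ((PySem.Chars.split₀ (s.toList.map pvBlank)).map List.length).map (fun n : Nat => (n : Int)) := by
      conv_rhs => rw [← hblank, ← PySem.Str.split₀_map_toList]
      rw [List.map_map, List.map_map]
      refine List.map_congr_left (fun r _ => ?_)
      simp [PySem.Str.len_eq, Function.comp]
    rw [h1, pv_split_blank]
  have hcount : (PySem.Str.count s "1" : Int) = ((pvRuns s.toList 0).sum : Int) := by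
    rw [PySem.Str.count_eq]
    have : ("1" : String).toList = ['1'] := rfl
    rw [this, pv_count_one, pv_runs_sum s.toList 0]
    simp
  have hfold : (s.toList.foldl (fun (st : Int × Int) char =>
      if char = '1' then (max st.1 (st.2 + 1), st.2 + 1) else (st.1, 0)) (0, 0)).1
      = (pvMaxN (pvRuns s.toList 0) : Int) := by
    have h0 : ((0 : Int), (0 : Int)) = (((0 : Nat) : Int), ((0 : Nat) : Int)) := by simp
    rw [h0, pv_foldInt_eq s.toList 0 0, pv_foldN_spec s.toList 0 0 le_rfl]
    simp
  rw [hruns, hcount, hfold, pv_max?_eq]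
  have : ((pvRuns s.toList 0).map (fun n : Nat => (n : Int))).sum = ((pvRuns s.toList 0).sum : Int) := by
    simp [Nat.cast_list_sum]
  rw [this]

-- ===== VERDICT (by name: the statement is the Claim_ definition above) =====
theorem calculate_salary_spec : Claim_equal_calculate_salary := by
  intro t test_cases _ hpre
  unfold Spec_calculate_salary calculate_salary calculate_salary_alt Pre_calculate_salary at *
  rw [PySem.List.foldl_append_singleton_eq_map, List.nil_append]
  rw [PySem.List.slice_to test_cases (le_max_right t 0)]
  by_cases ht : t ≤ 0
  · have h1 : PySem.List.pyRange 0 t = [] := by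
      rw [PySem.List.pyRange_of_pos 0 t Int.one_pos]
      simp [not_lt.mpr ht]
    have h2 : (max t 0).toNat = 0 := by omega
    simp [h1, h2]
  · push_neg at ht
    have hrange : PySem.List.pyRange 0 t = (List.range t.toNat).map (fun k : Nat => (k : Int)) := by
      rw [PySem.List.pyRange_of_pos 0 t Int.one_pos]
      have : ((t - 0 + 1 - 1) / 1).toNat = t.toNat := by omega
      simp [ht, this]
    have hmax : (max t 0).toNat = t.toNat := by omega
    have hlen : t.toNat ≤ test_cases.length := by omega
    rw [hrange, hmax, List.map_map]
    apply List.ext_getElem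
    · simp [hlen]
    · intro k hk1 hk2
      simp only [List.getElem_map, List.getElem_range, Function.comp_apply]
      have hk : k < test_cases.length := by
        simp at hk1; omega
      rw [PySem.List.pyGetD_natCast, List.getD_eq_getElem _ _ hk]
      rw [List.getElem_take]
      exact pv_case_eq _
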